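-- pv_equiv track=rewrite | github.com/maxiveloso/ai-fairness-frameworks | techniques/causal/M2-S1-P3-Wu-2019-SensitivityAnalysisforCounterfactualFairness.py | _get_non_descendants
-- ===== SOURCE A (Python) =====
-- from typing import Dict, List, Tuple, Optional, Union, Callable
--
-- def _get_non_descendants(graph: Dict[str, List[str]], protected_attr: str, n_features: int) -> List[int]:
--     """Get indices of features that are non-descendants of protected attribute."""
--     descendants = set()
--
--     def find_descendants(node):
--         for child in graph.get(node, []):
--             if child not in descendants:
--                 descendants.add(child)
--                 find_descendants(child)
--
--     find_descendants(protected_attr)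
--
--     # Convert to feature indices (assuming features are named X0, X1, ...)
--     non_descendant_indices = []
--     for i in range(n_features):
--         feature_name = f'X{i}'
--         if feature_name not in descendants:
--             non_descendant_indices.append(i)
--
--     return non_descendant_indices
-- ===== SOURCE B (Python) =====
-- def _get_non_descendants(graph, protected_attr, n_features):
--     """Get indices of features that are non-descendants of protected attribute."""
--     descendants = set()
--     stack = list(reversed(graph.get(protected_attr, [])))
--     while stack:
--         node = stack.pop()
--         if node not in descendants:
--             descendants.add(node)
--             stack.extend(reversed(graph.get(node, [])))
--     return [i for i in range(n_features) if f'X{i}' not in descendants]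
-- ===== Notes on version B (the rewrite author's own statement) =====
-- stated objective: alternative
-- what changed: Replaced A's recursive find_descendants helper (function-call recursion over children with a shared mutable set) by an iterative depth-first traversal with an explicit stack: pop a node, and if unvisited mark it and push its children (reversed, so the visit order is preserved); the final index scan becomes a comprehension.
import Mathlib
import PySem

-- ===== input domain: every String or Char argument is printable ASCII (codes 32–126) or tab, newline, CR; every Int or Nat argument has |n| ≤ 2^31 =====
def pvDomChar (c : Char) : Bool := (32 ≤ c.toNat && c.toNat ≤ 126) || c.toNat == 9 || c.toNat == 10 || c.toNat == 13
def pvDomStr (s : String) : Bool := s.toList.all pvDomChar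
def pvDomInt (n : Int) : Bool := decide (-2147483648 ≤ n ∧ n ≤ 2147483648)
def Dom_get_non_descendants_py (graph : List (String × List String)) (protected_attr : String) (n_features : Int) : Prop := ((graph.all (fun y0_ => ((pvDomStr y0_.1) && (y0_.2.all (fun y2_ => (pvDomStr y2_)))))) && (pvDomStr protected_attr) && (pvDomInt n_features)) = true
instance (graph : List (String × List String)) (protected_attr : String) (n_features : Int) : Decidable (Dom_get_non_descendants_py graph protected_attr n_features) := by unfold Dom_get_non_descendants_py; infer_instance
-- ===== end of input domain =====

-- B replaces A's recursive depth-first helper by an iterative explicit-stack loop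
-- (pop a node; if unvisited, mark it and push its children) — objective: alternative.

-- shared helper: graph.get(node, [])
def pvChildren (graph : List (String × List String)) (node : String) : List String :=
  PySem.Dict.getD (PySem.Dict.mk graph) node []

-- every child list returned by pvChildren consists of values of the graph (needed for termination of B's loop)
theorem pvChildren_subset {graph : List (String × List String)} {node x : String}
    (hx : x ∈ pvChildren graph node) : x ∈ (graph.map Prod.snd).flatten := by
  unfold pvChildren PySem.Dict.getD PySem.Dict.get? at hx
  cases hfind : List.find? (fun p => p.1 == node) (PySem.Dict.mk graph).items with
  | none => simp [hfind] at hx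
  | some p =>
    simp only [hfind, Option.map_some, Option.getD_some] at hx
    have hp : p ∈ graph := List.mem_of_find?_eq_some hfind
    exact List.mem_flatten.mpr ⟨p.2, List.mem_map.mpr ⟨p, hp, rfl⟩, hx⟩

-- termination measure: occurrences of graph values not yet in the visited set
def pvM (graph : List (String × List String)) (S : PySem.Set String) : Nat :=
  (((graph.map Prod.snd).flatten).filter (fun x => !(PySem.Set.contains S x))).length

-- visiting a fresh graph value strictly shrinks the measure
theorem pvM_add_lt (graph : List (String × List String)) (S : PySem.Set String) (c : String)
    (hcu : c ∈ (graph.map Prod.snd).flatten) (hc : c ∉ S) :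
    pvM graph (PySem.Set.add S c) < pvM graph S := by
  unfold pvM
  have hadd : PySem.Set.add S c = S ++ [c] := by
    simp [PySem.Set.add, PySem.Set.contains, hc]
  rw [hadd]
  have himp : ∀ a : String, ((!(S ++ [c]).contains a) = true) → ((!S.contains a) = true) := by
    intro a ha
    simp only [Bool.not_eq_true'] at ha ⊢
    simp_all
  revert hcu
  induction (graph.map Prod.snd).flatten with
  | nil => intro hcu; simp at hcu
  | cons y ys ih =>
    intro hcu
    have hsub : (ys.filter fun x => !(S ++ [c]).contains x).length ≤
                (ys.filter fun x => !S.contains x).length :=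
      List.Sublist.length_le (List.monotone_filter_right ys himp)
    simp only [List.filter_cons]
    rcases List.mem_cons.mp hcu with rfl | hmem
    · rw [if_neg (by simp), if_pos (by simp [hc])]
      simp only [List.length_cons]
      omega
    · have hrec := ih hmem
      by_cases hA : (!(S ++ [c]).contains y) = true
      · rw [if_pos hA, if_pos (himp y hA)]
        simp only [List.length_cons]
        omega
      · rw [if_neg hA]
        by_cases hB : (!S.contains y) = true
        · rw [if_pos hB]
          simp only [List.length_cons]
          omega
        · rw [if_neg hB]
          omega

-- ===== PORT A =====
-- A's recursive helper find_descendants; the fuel only bounds the recursion depth: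
-- each nested call first adds a fresh graph value to the set, so the depth never
-- exceeds |values| and the fuel (|values| + 1) passed below is never exhausted.
mutual
def pvFindDesc (graph : List (String × List String)) : Nat → String → PySem.Set String → PySem.Set String
  | 0, _, S => S
  | f + 1, node, S => pvFindDescGo graph f (pvChildren graph node) S
def pvFindDescGo (graph : List (String × List String)) : Nat → List String → PySem.Set String → PySem.Set String
  | _, [], S => S
  | f, c :: cs, S =>
    if c ∈ S then pvFindDescGo graph f cs S
    else pvFindDescGo graph f cs (pvFindDesc graph f c (PySem.Set.add S c))
end

def get_non_descendants_py (graph : List (String × List String)) (protected_attr : String) (n_features : Int) : List Int :=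
  let descendants := pvFindDesc graph ((graph.map Prod.snd).flatten.length + 1) protected_attr PySem.Set.empty
  (PySem.List.pyRange 0 n_features 1).foldl
    (fun acc i => if ("X" ++ PySem.Int.toStr i) ∉ descendants then acc ++ [i] else acc) []

-- ===== PORT B =====
-- iterative DFS: pop a node from the stack; if unvisited, mark it and push its children
def pvBStack (graph : List (String × List String)) :
    (S : PySem.Set String) → (stack : List String) →
    (∀ x ∈ stack, x ∈ (graph.map Prod.snd).flatten) → PySem.Set String
  | S, [], _ => S
  | S, c :: rest, h =>
    if hc : c ∈ S then
      pvBStack graph S rest (fun x hx => h x (List.mem_cons_of_mem _ hx))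
    else
      pvBStack graph (PySem.Set.add S c) (pvChildren graph c ++ rest)
        (fun x hx => (List.mem_append.mp hx).elim (fun h' => pvChildren_subset h')
          (fun h' => h x (List.mem_cons_of_mem _ h')))
termination_by S stack _ => (pvM graph S, stack.length)
decreasing_by
  · exact Prod.Lex.right _ (by simp only [List.length_cons]; omega)
  · exact Prod.Lex.left _ _ (pvM_add_lt graph S c (h c (by simp)) hc)

def get_non_descendants_py_alt (graph : List (String × List String)) (protected_attr : String) (n_features : Int) : List Int :=
  let descendants := pvBStack graph PySem.Set.empty (pvChildren graph protected_attr)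
    (fun _ hx => pvChildren_subset hx)
  (PySem.List.pyRange 0 n_features 1).filter
    (fun i => decide (("X" ++ PySem.Int.toStr i) ∉ descendants))

-- ===== PRECONDITION & SPEC =====
def Spec_get_non_descendants_py (graph : List (String × List String)) (protected_attr : String) (n_features : Int) (out : List Int) : Prop := out = get_non_descendants_py_alt graph protected_attr n_features
instance (graph : List (String × List String)) (protected_attr : String) (n_features : Int) (out : List Int) : Decidable (Spec_get_non_descendants_py graph protected_attr n_features out) := by unfold Spec_get_non_descendants_py; infer_instance

-- ===== CLAIM (what is proved, stated in full; the proofs are below) =====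
def Claim_equal_get_non_descendants_py : Prop := ∀ (graph : List (String × List String)) (protected_attr : String) (n_features : Int), Dom_get_non_descendants_py graph protected_attr n_features → Spec_get_non_descendants_py graph protected_attr n_features (get_non_descendants_py graph protected_attr n_features)

-- ===== LEMMAS AND PROOFS =====

theorem pvMemAdd {S : PySem.Set String} {c x : String} (hx : x ∈ S) : x ∈ PySem.Set.add S c := by
  simp only [PySem.Set.add, PySem.Set.contains, List.contains_eq_mem, decide_eq_true_eq]
  split <;> simp [hx]

theorem pvM_antitone (graph : List (String × List String)) (S T : PySem.Set String)
    (h : ∀ x, x ∈ S → x ∈ T) : pvM graph T ≤ pvM graph S := by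
  unfold pvM
  refine List.Sublist.length_le (List.monotone_filter_right _ ?_)
  intro a ha
  simp only [Bool.not_eq_true', PySem.Set.contains, List.contains_eq_mem,
    decide_eq_false_iff_not] at ha ⊢
  exact fun hs => ha (h a hs)

-- A's DFS only grows the visited set
theorem pvFindDesc_grow (graph : List (String × List String)) :
    ∀ f, (∀ node S x, x ∈ S → x ∈ pvFindDesc graph f node S) ∧
         (∀ cs S x, x ∈ S → x ∈ pvFindDescGo graph f cs S) := by
  intro f
  induction f with
  | zero =>
    refine ⟨fun node S x hx => by simpa [pvFindDesc] using hx, fun cs => ?_⟩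
    induction cs with
    | nil => intro S x hx; simpa [pvFindDescGo] using hx
    | cons c cs ih =>
      intro S x hx
      by_cases hc : c ∈ S
      · rw [show pvFindDescGo graph 0 (c :: cs) S = pvFindDescGo graph 0 cs S by
          simp [pvFindDescGo, hc]]
        exact ih S x hx
      · rw [show pvFindDescGo graph 0 (c :: cs) S
            = pvFindDescGo graph 0 cs (pvFindDesc graph 0 c (PySem.Set.add S c)) by
          simp [pvFindDescGo, hc]]
        exact ih _ x (by simpa [pvFindDesc] using pvMemAdd (c := c) hx)
  | succ f ih =>
    have hdesc : ∀ node S x, x ∈ S → x ∈ pvFindDesc graph (f + 1) node S := by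
      intro node S x hx
      rw [show pvFindDesc graph (f + 1) node S
          = pvFindDescGo graph f (pvChildren graph node) S by simp [pvFindDesc]]
      exact ih.2 (pvChildren graph node) S x hx
    refine ⟨hdesc, fun cs => ?_⟩
    induction cs with
    | nil => intro S x hx; simpa [pvFindDescGo] using hx
    | cons c cs ihc =>
      intro S x hx
      by_cases hc : c ∈ S
      · rw [show pvFindDescGo graph (f + 1) (c :: cs) S = pvFindDescGo graph (f + 1) cs S by
          simp [pvFindDescGo, hc]]
        exact ihc S x hx
      · rw [show pvFindDescGo graph (f + 1) (c :: cs) S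
            = pvFindDescGo graph (f + 1) cs (pvFindDesc graph (f + 1) c (PySem.Set.add S c)) by
          simp [pvFindDescGo, hc]]
        exact ihc _ x (hdesc c _ x (pvMemAdd hx))

-- proof-argument congruence and one-step unfolding of B's stack loop
theorem pvBStack_congr (graph : List (String × List String)) (S : PySem.Set String)
    {st1 st2 : List String} (e : st1 = st2)
    (h1 : ∀ x ∈ st1, x ∈ (graph.map Prod.snd).flatten)
    (h2 : ∀ x ∈ st2, x ∈ (graph.map Prod.snd).flatten) :
    pvBStack graph S st1 h1 = pvBStack graph S st2 h2 := by subst e; rfl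

theorem pvBStack_nil (graph : List (String × List String)) (S : PySem.Set String)
    (h : ∀ x ∈ ([] : List String), x ∈ (graph.map Prod.snd).flatten) :
    pvBStack graph S [] h = S := by rw [pvBStack]

theorem pvBStack_cons (graph : List (String × List String)) (S : PySem.Set String)
    (c : String) (rest : List String)
    (h : ∀ x ∈ c :: rest, x ∈ (graph.map Prod.snd).flatten) :
    pvBStack graph S (c :: rest) h =
      if c ∈ S then
        pvBStack graph S rest (fun x hx => h x (List.mem_cons_of_mem _ hx))
      else
        pvBStack graph (PySem.Set.add S c) (pvChildren graph c ++ rest)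
          (fun x hx => (List.mem_append.mp hx).elim (fun h' => pvChildren_subset h')
            (fun h' => h x (List.mem_cons_of_mem _ h'))) := by
  rw [pvBStack]
  split <;> rfl

-- key bisimulation: running B's stack loop on cs ++ rest first saturates cs exactly
-- as A's recursive helper does, then continues with rest
theorem pvMainLemma (graph : List (String × List String)) :
    ∀ f (cs rest : List String) (S : PySem.Set String)
      (_hcs : ∀ x ∈ cs, x ∈ (graph.map Prod.snd).flatten)
      (hrest : ∀ x ∈ rest, x ∈ (graph.map Prod.snd).flatten)
      (_hf : pvM graph S ≤ f)
      (h1 : ∀ x ∈ cs ++ rest, x ∈ (graph.map Prod.snd).flatten),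
      pvBStack graph S (cs ++ rest) h1 =
      pvBStack graph (pvFindDescGo graph f cs S) rest hrest := by
  intro f
  induction f with
  | zero =>
    intro cs
    induction cs with
    | nil =>
      intro rest S hcs hrest hf h1
      rw [show pvFindDescGo graph 0 [] S = S by simp [pvFindDescGo]]
      exact pvBStack_congr graph S rfl h1 hrest
    | cons c cs ih =>
      intro rest S hcs hrest hf h1
      have hcS : c ∈ S := by
        by_contra hc
        have := pvM_add_lt graph S c (hcs c (by simp)) hc
        omega
      rw [show pvFindDescGo graph 0 (c :: cs) S = pvFindDescGo graph 0 cs S by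
        simp [pvFindDescGo, hcS]]
      change pvBStack graph S (c :: (cs ++ rest)) h1 = _
      rw [pvBStack_cons graph S c (cs ++ rest) h1, if_pos hcS]
      exact ih rest S (fun x hx => hcs x (List.mem_cons_of_mem _ hx)) hrest hf _
  | succ f ihf =>
    intro cs
    induction cs with
    | nil =>
      intro rest S hcs hrest hf h1
      rw [show pvFindDescGo graph (f + 1) [] S = S by simp [pvFindDescGo]]
      exact pvBStack_congr graph S rfl h1 hrest
    | cons c cs ih =>
      intro rest S hcs hrest hf h1
      change pvBStack graph S (c :: (cs ++ rest)) h1 = _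
      rw [pvBStack_cons graph S c (cs ++ rest) h1]
      by_cases hcS : c ∈ S
      · rw [if_pos hcS]
        rw [show pvFindDescGo graph (f + 1) (c :: cs) S = pvFindDescGo graph (f + 1) cs S by
          simp [pvFindDescGo, hcS]]
        exact ih rest S (fun x hx => hcs x (List.mem_cons_of_mem _ hx)) hrest hf _
      · rw [if_neg hcS]
        have hcu : c ∈ (graph.map Prod.snd).flatten := hcs c (by simp)
        have hlt : pvM graph (PySem.Set.add S c) < pvM graph S := pvM_add_lt graph S c hcu hcS
        have hB : ∀ x ∈ cs ++ rest, x ∈ (graph.map Prod.snd).flatten :=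
          fun x hx => h1 x (List.mem_cons_of_mem _ hx)
        rw [ihf (pvChildren graph c) (cs ++ rest) (PySem.Set.add S c)
          (fun x hx => pvChildren_subset hx) hB (by omega)]
        have hgrow : ∀ x, x ∈ PySem.Set.add S c →
            x ∈ pvFindDescGo graph f (pvChildren graph c) (PySem.Set.add S c) :=
          fun x hx => (pvFindDesc_grow graph f).2 _ _ x hx
        have hm2 : pvM graph (pvFindDescGo graph f (pvChildren graph c) (PySem.Set.add S c)) ≤ f + 1 := by
          have := pvM_antitone graph (PySem.Set.add S c) _ hgrow
          omega
        rw [ih rest (pvFindDescGo graph f (pvChildren graph c) (PySem.Set.add S c))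
          (fun x hx => hcs x (List.mem_cons_of_mem _ hx)) hrest hm2]
        rw [show pvFindDescGo graph (f + 1) (c :: cs) S
            = pvFindDescGo graph (f + 1) cs (pvFindDesc graph (f + 1) c (PySem.Set.add S c)) by
          simp [pvFindDescGo, hcS]]
        rw [show pvFindDesc graph (f + 1) c (PySem.Set.add S c)
            = pvFindDescGo graph f (pvChildren graph c) (PySem.Set.add S c) by
          simp [pvFindDesc]]

-- ===== VERDICT (by name: the statement is the Claim_ definition above) =====
theorem get_non_descendants_py_spec : Claim_equal_get_non_descendants_py := by
  intro graph protected_attr n_features _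
  unfold Spec_get_non_descendants_py
  simp only [get_non_descendants_py, get_non_descendants_py_alt]
  have hnil : ∀ x ∈ ([] : List String), x ∈ (graph.map Prod.snd).flatten :=
    fun x hx => absurd hx (by simp)
  have h1 : ∀ x ∈ pvChildren graph protected_attr ++ [],
      x ∈ (graph.map Prod.snd).flatten :=
    fun x hx => pvChildren_subset (by simpa using hx)
  have hsets : pvBStack graph PySem.Set.empty (pvChildren graph protected_attr)
      (fun _ hx => pvChildren_subset hx)
      = pvFindDesc graph ((graph.map Prod.snd).flatten.length + 1) protected_attr PySem.Set.empty := by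
    have e0 : pvBStack graph PySem.Set.empty (pvChildren graph protected_attr)
        (fun _ hx => pvChildren_subset hx)
        = pvBStack graph PySem.Set.empty (pvChildren graph protected_attr ++ []) h1 :=
      pvBStack_congr graph PySem.Set.empty (List.append_nil _).symm _ _
    have e1 := pvMainLemma graph ((graph.map Prod.snd).flatten.length)
      (pvChildren graph protected_attr) [] PySem.Set.empty
      (fun x hx => pvChildren_subset hx) hnil
      (by unfold pvM; exact List.length_filter_le _ _) h1
    have e2 := pvBStack_nil graph
      (pvFindDescGo graph ((graph.map Prod.snd).flatten.length)
        (pvChildren graph protected_attr) PySem.Set.empty) hnil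
    have e3 : pvFindDesc graph ((graph.map Prod.snd).flatten.length + 1) protected_attr
        PySem.Set.empty
        = pvFindDescGo graph ((graph.map Prod.snd).flatten.length)
          (pvChildren graph protected_attr) PySem.Set.empty := by
      simp [pvFindDesc]
    exact e0.trans (e1.trans (e2.trans e3.symm))
  rw [← hsets]
  rw [PySem.List.foldl_append_ite_eq_filter]
  simp
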